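-- pv_equiv track=rewrite | github.com/Tosanch/Codility_Lessons | Description and Code/CountingElem_MissingInteger.py | solution
-- ===== SOURCE A (Python) =====
-- def solution(A):
--     N = len(A)
--
--     # Step 1: Ignore numbers outside the range [1, N]
--     for i in range(N):
--         if A[i] <= 0 or A[i] > N:
--             A[i] = N + 1  # Replace invalid numbers with a number larger than N
--
--     # Step 2: Use the array itself for marking presence
--     for i in range(N):
--         val = abs(A[i])  # We work with absolute value to handle marking
--         if 1 <= val <= N:
--             # Mark the index val - 1 as negative to indicate that val is present
--             if A[val - 1] > 0:
--                 A[val - 1] = -A[val - 1]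
--
--     # Step 3: Find the first index with a positive value, which means the corresponding number is missing
--     for i in range(N):
--         if A[i] > 0:
--             return i + 1  # The missing number is i + 1
--
--     # Step 4: If all numbers 1 to N are present, the missing number is N + 1
--     return N + 1
-- ===== SOURCE B (Python) =====
-- def solution(A):
--     s = set(A)
--     i = 1
--     while i in s:
--         i += 1
--     return i
-- ===== Notes on version B (the rewrite author's own statement) =====
-- stated objective: simpler
-- what changed: Replaces the three-pass in-place sign-marking of the input array by building a hash set of the elements once and scanning i = 1, 2, 3, ... upward until i is not in the set; B does not mutate the input list (the equivalence is about the return value only).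
import Mathlib
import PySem

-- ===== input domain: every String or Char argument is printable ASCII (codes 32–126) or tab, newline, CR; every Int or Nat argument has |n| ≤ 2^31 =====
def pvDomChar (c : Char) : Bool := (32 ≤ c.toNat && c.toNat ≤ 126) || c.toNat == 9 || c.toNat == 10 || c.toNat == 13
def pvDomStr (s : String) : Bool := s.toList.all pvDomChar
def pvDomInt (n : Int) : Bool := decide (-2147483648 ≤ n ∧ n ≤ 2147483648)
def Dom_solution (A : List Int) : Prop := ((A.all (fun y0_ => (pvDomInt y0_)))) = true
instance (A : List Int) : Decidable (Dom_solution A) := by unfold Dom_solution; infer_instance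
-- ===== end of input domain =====

-- B replaces A's three-pass in-place sign-marking by a set build plus an upward membership scan (simpler);
-- Python A mutates its argument in place, B does not: the equivalence proved here is about the RETURN value only.

-- ===== PORT A =====
-- step 3+4 of A: early return out of a for-loop over the indices, else N+1
def solutionStep3 (B : List Int) (N : Int) : List Int → Int
  | [] => N + 1
  | i :: rest => if PySem.List.pyGetD B i 0 > 0 then i + 1 else solutionStep3 B N rest

-- every index A reads/writes is in range, so pyGetD _ _ 0 / pySetD are exact here
def solution (A : List Int) : Int :=
  let N : Int := A.length
  let A1 := (PySem.List.pyRange 0 N 1).foldl (fun B i =>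
      if PySem.List.pyGetD B i 0 ≤ 0 ∨ PySem.List.pyGetD B i 0 > N
      then PySem.List.pySetD B i (N + 1) else B) A
  let A2 := (PySem.List.pyRange 0 N 1).foldl (fun B i =>
      let v := |PySem.List.pyGetD B i 0|
      if 1 ≤ v ∧ v ≤ N then
        (if PySem.List.pyGetD B (v - 1) 0 > 0
         then PySem.List.pySetD B (v - 1) (-(PySem.List.pyGetD B (v - 1) 0))
         else B)
      else B) A1
  solutionStep3 A2 N (PySem.List.pyRange 0 N 1)

-- ===== PORT B =====
-- the while loop passes distinct members of s, so it runs at most len(A) times: fuel len(A)+1 is exact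
def solutionAltLoop (s : PySem.Set Int) : Nat → Int → Int
  | 0, i => i
  | fuel + 1, i => if PySem.Set.contains s i then solutionAltLoop s fuel (i + 1) else i

def solution_alt (A : List Int) : Int :=
  let s : PySem.Set Int := PySem.Set.ofList A
  solutionAltLoop s (A.length + 1) 1

-- ===== PRECONDITION & SPEC =====
def Spec_solution (A : List Int) (out : Int) : Prop := out = solution_alt A
instance (A : List Int) (out : Int) : Decidable (Spec_solution A out) := by unfold Spec_solution; infer_instance

-- ===== CLAIM (what is proved, stated in full; the proofs are below) =====
def Claim_equal_solution : Prop := ∀ (A : List Int), Dom_solution A → Spec_solution A (solution A)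

-- ===== LEMMAS AND PROOFS =====

-- the value step 1 of A writes at a cell holding v
def pvG (N v : Int) : Int := if v ≤ 0 ∨ v > N then N + 1 else v

lemma pv_set_take_succ (l : List Int) (n : Nat) (v : Int) (h : n < l.length) :
    (l.set n v).take (n+1) = l.take n ++ [v] := by
  rw [List.take_succ_eq_append_getElem (by simpa using h)]
  rw [List.take_set, List.set_eq_of_length_le (by simp)]
  simp

lemma pv_drop_set_succ (l : List Int) (n : Nat) (v : Int) : (l.set n v).drop (n+1) = l.drop (n+1) := by
  simp [List.drop_set]

-- step 1 of A maps pvG over the untouched suffix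
lemma pv_step1_go (N : Int) : ∀ (cnt k : Nat) (C : List Int), k + cnt = C.length →
    (PySem.List.pyRange (k : Int) (C.length : Int) 1).foldl (fun B i =>
      if PySem.List.pyGetD B i 0 ≤ 0 ∨ PySem.List.pyGetD B i 0 > N
      then PySem.List.pySetD B i (N + 1) else B) C
      = C.take k ++ (C.drop k).map (pvG N) := by
  intro cnt
  induction cnt with
  | zero =>
    intro k C hk
    rw [PySem.List.pyRange_one_eq_nil (by omega), List.foldl_nil,
      List.take_of_length_le (by omega), List.drop_eq_nil_of_le (by omega),
      List.map_nil, List.append_nil]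
  | succ cnt ih =>
    intro k C hk
    have hklt : k < C.length := by omega
    have hcons : PySem.List.pyRange (k:Int) (C.length:Int) 1
        = (k:Int) :: PySem.List.pyRange ((k+1 : Nat):Int) (C.length:Int) 1 := by
      rw [PySem.List.pyRange_one_cons (by exact_mod_cast hklt)]; norm_num
    rw [hcons, List.foldl_cons]
    have hget : PySem.List.pyGetD C (k:Int) 0 = C[k] := by
      rw [PySem.List.pyGetD_natCast, List.getD_eq_getElem C 0 hklt]
    have hdropk : C.drop k = C[k] :: C.drop (k+1) := List.drop_eq_getElem_cons hklt
    by_cases hc : C[k] ≤ 0 ∨ C[k] > N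
    · rw [if_pos (by rw [hget]; exact hc), PySem.List.pySetD_natCast]
      have ihs := ih (k+1) (C.set k (N+1)) (by simp; omega)
      rw [List.length_set] at ihs
      rw [ihs, pv_set_take_succ C k (N+1) hklt, pv_drop_set_succ, hdropk, List.map_cons]
      simp [pvG, hc]
    · rw [if_neg (by rw [hget]; exact hc)]
      rw [ih (k+1) C (by omega), hdropk, List.map_cons,
        show pvG N C[k] = C[k] from by simp [pvG, hc],
        List.take_succ_eq_append_getElem (by simpa using hklt), List.append_assoc,
        List.singleton_append]

-- step 2 of A: a cell j ends negative exactly when some cell of the step-1 array holds j+1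
lemma pv_step2_go (B1 : List Int)
    (hpos : ∀ j < B1.length, 1 ≤ B1.getD j 0 ∧ B1.getD j 0 ≤ (B1.length:Int) + 1) :
    ∀ (cnt k : Nat), k + cnt = B1.length → ∀ (C : List Int), C.length = B1.length →
    (∀ j < B1.length, C.getD j 0 = B1.getD j 0 ∨ C.getD j 0 = -(B1.getD j 0)) →
    (∀ j < B1.length, C.getD j 0 < 0 ↔ ∃ i < k, B1.getD i 0 = (j:Int)+1) →
    (((PySem.List.pyRange (k:Int) (B1.length:Int) 1).foldl (fun B i =>
        let v := |PySem.List.pyGetD B i 0|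
        if 1 ≤ v ∧ v ≤ (B1.length:Int) then
          (if PySem.List.pyGetD B (v - 1) 0 > 0
           then PySem.List.pySetD B (v - 1) (-(PySem.List.pyGetD B (v - 1) 0))
           else B)
        else B) C).length = B1.length ∧
     (∀ j < B1.length, ((PySem.List.pyRange (k:Int) (B1.length:Int) 1).foldl (fun B i =>
        let v := |PySem.List.pyGetD B i 0|
        if 1 ≤ v ∧ v ≤ (B1.length:Int) then
          (if PySem.List.pyGetD B (v - 1) 0 > 0
           then PySem.List.pySetD B (v - 1) (-(PySem.List.pyGetD B (v - 1) 0))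
           else B)
        else B) C).getD j 0 = B1.getD j 0 ∨ ((PySem.List.pyRange (k:Int) (B1.length:Int) 1).foldl (fun B i =>
        let v := |PySem.List.pyGetD B i 0|
        if 1 ≤ v ∧ v ≤ (B1.length:Int) then
          (if PySem.List.pyGetD B (v - 1) 0 > 0
           then PySem.List.pySetD B (v - 1) (-(PySem.List.pyGetD B (v - 1) 0))
           else B)
        else B) C).getD j 0 = -(B1.getD j 0)) ∧
     (∀ j < B1.length, ((PySem.List.pyRange (k:Int) (B1.length:Int) 1).foldl (fun B i =>
        let v := |PySem.List.pyGetD B i 0|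
        if 1 ≤ v ∧ v ≤ (B1.length:Int) then
          (if PySem.List.pyGetD B (v - 1) 0 > 0
           then PySem.List.pySetD B (v - 1) (-(PySem.List.pyGetD B (v - 1) 0))
           else B)
        else B) C).getD j 0 < 0 ↔ ∃ i < B1.length, B1.getD i 0 = (j:Int)+1)) := by
  intro cnt
  induction cnt with
  | zero =>
    intro k hk C hlen habs hneg
    rw [PySem.List.pyRange_one_eq_nil (by omega)]
    simp only [List.foldl_nil]
    refine ⟨hlen, habs, ?_⟩
    intro j hj
    rw [hneg j hj, show k = B1.length from by omega]
  | succ cnt ih =>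
    intro k hk C hlen habs hneg
    have hklt : k < B1.length := by omega
    have hcons : PySem.List.pyRange (k:Int) (B1.length:Int) 1
        = (k:Int) :: PySem.List.pyRange ((k+1 : Nat):Int) (B1.length:Int) 1 := by
      rw [PySem.List.pyRange_one_cons (by exact_mod_cast hklt)]; norm_num
    rw [hcons, List.foldl_cons]
    set b := B1.getD k 0 with hb
    obtain ⟨hb1, hb2⟩ := hpos k hklt
    have hvabs : |PySem.List.pyGetD C (k:Int) 0| = b := by
      rw [PySem.List.pyGetD_natCast]
      rcases habs k hklt with h | h
      · rw [h, abs_of_nonneg (by omega)]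
      · rw [h, abs_neg, abs_of_nonneg (by omega)]
    simp only [hvabs]
    by_cases hbN : b ≤ (B1.length:Int)
    · rw [if_pos ⟨hb1, hbN⟩]
      set t := (b - 1).toNat with ht
      have htb : (t : Int) = b - 1 := Int.toNat_of_nonneg (by omega)
      have htlt : t < B1.length := by omega
      have hread : PySem.List.pyGetD C (b - 1) 0 = C.getD t 0 := by
        rw [← htb, PySem.List.pyGetD_natCast]
      -- whenever B1 holds j+1 at the processed index, j must be t
      have hjt : ∀ j : Nat, j < B1.length → b = (j:Int) + 1 → j = t := by
        intro j _ hj; omega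
      by_cases hgt : PySem.List.pyGetD C (b - 1) 0 > 0
      · rw [if_pos hgt]
        rw [hread] at hgt
        have hset : PySem.List.pySetD C (b - 1) (-(PySem.List.pyGetD C (b - 1) 0))
            = C.set t (-(C.getD t 0)) := by
          rw [hread, ← htb, PySem.List.pySetD_natCast]
        rw [hset]
        have hgetset : ∀ j : Nat, j < B1.length →
            (C.set t (-(C.getD t 0))).getD j 0 = if t = j then -(C.getD t 0) else C.getD j 0 := by
          intro j hj
          have hj' : j < C.length := by omega
          rw [List.getD_eq_getElem _ 0 (by simpa using hj'), List.getElem_set,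
            List.getD_eq_getElem _ 0 hj']
        refine ih (k+1) (by omega) _ (by simpa using hlen) ?_ ?_
        · intro j hj
          rw [hgetset j hj]
          split_ifs with h
          · rw [← h]
            rcases habs t htlt with h' | h' <;> rw [h'] <;> simp
          · exact habs j hj
        · intro j hj
          rw [hgetset j hj]
          split_ifs with h
          · constructor
            · intro _
              refine ⟨k, by omega, ?_⟩
              have hbj : b = (j:Int) + 1 := by omega
              rw [hb] at hbj
              exact hbj
            · intro _
              omega
          · rw [hneg j hj]
            constructor
            · rintro ⟨i, hi, hieq⟩
              exact ⟨i, by omega, hieq⟩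
            · rintro ⟨i, hi, hieq⟩
              rcases Nat.lt_succ_iff_lt_or_eq.mp hi with hi' | rfl
              · exact ⟨i, hi', hieq⟩
              · exact absurd (hjt j hj (by rw [hb]; exact hieq)).symm h
      · rw [if_neg hgt]
        rw [hread] at hgt
        have hCt : C.getD t 0 < 0 := by
          rcases habs t htlt with h | h <;>
            rcases hpos t htlt with ⟨h1, _⟩ <;> omega
        refine ih (k+1) (by omega) C hlen habs ?_
        intro j hj
        rw [hneg j hj]
        constructor
        · rintro ⟨i, hi, hieq⟩
          exact ⟨i, by omega, hieq⟩
        · rintro ⟨i, hi, hieq⟩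
          rcases Nat.lt_succ_iff_lt_or_eq.mp hi with hi' | rfl
          · exact ⟨i, hi', hieq⟩
          · have hjj := hjt j hj (by rw [hb]; exact hieq)
            subst hjj
            exact (hneg t htlt).mp hCt
    · rw [if_neg (by intro h; exact hbN h.2)]
      refine ih (k+1) (by omega) C hlen habs ?_
      intro j hj
      rw [hneg j hj]
      constructor
      · rintro ⟨i, hi, hieq⟩
        exact ⟨i, by omega, hieq⟩
      · rintro ⟨i, hi, hieq⟩
        rcases Nat.lt_succ_iff_lt_or_eq.mp hi with hi' | rfl
        · exact ⟨i, hi', hieq⟩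
        · exfalso
          have hbj : b = (j:Int) + 1 := by rw [hb]; exact hieq
          omega

-- step 3: no positive cell means N+1
lemma pv_step3_none (B : List Int) (N : Int) (l : List Int)
    (h : ∀ i ∈ l, ¬ PySem.List.pyGetD B i 0 > 0) : solutionStep3 B N l = N + 1 := by
  induction l with
  | nil => rfl
  | cons a t ih =>
    simp only [solutionStep3, if_neg (h a (by simp))]
    exact ih (fun i hi => h i (by simp [hi]))

-- step 3: the first positive cell wins
lemma pv_step3_first (B : List Int) (N : Int) (l1 : List Int) (i0 : Int)
    (h1 : ∀ i ∈ l1, ¬ PySem.List.pyGetD B i 0 > 0) (h0 : PySem.List.pyGetD B i0 0 > 0) (l2 : List Int) :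
    solutionStep3 B N (l1 ++ i0 :: l2) = i0 + 1 := by
  induction l1 with
  | nil => simp [solutionStep3, if_pos h0]
  | cons a t ih =>
    simp only [List.cons_append, solutionStep3, if_neg (h1 a (by simp))]
    exact ih (fun i hi => h1 i (by simp [hi]))

-- B's loop returns the least m ≥ i outside s, given enough fuel
lemma pv_altLoop_ret (s : PySem.Set Int) (m : Int) : ∀ (fuel : Nat) (i : Int), i ≤ m → m ∉ s →
    (∀ k, i ≤ k → k < m → k ∈ s) → m - i < (fuel : Int) → solutionAltLoop s fuel i = m := by
  intro fuel
  induction fuel with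
  | zero => intro i h1 _ _ h4; omega
  | succ f ih =>
    intro i h1 h2 h3 h4
    rcases eq_or_lt_of_le h1 with rfl | hlt
    · have hc : PySem.Set.contains s i = false := by
        by_contra hc
        exact h2 ((PySem.Set.contains_iff s i).mp (by revert hc; cases s.contains i <;> simp))
      simp only [solutionAltLoop, hc, Bool.false_eq_true, if_false]
    · have hc : PySem.Set.contains s i = true :=
        (PySem.Set.contains_iff s i).mpr (h3 i le_rfl hlt)
      simp only [solutionAltLoop, hc, if_true]
      exact ih (i+1) (by omega) h2 (fun k hk1 hk2 => h3 k (by omega) hk2) (by push_cast at h4 ⊢; omega)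

-- pigeonhole: some j ∈ [1, N+1] is missing from A
lemma pv_exists_missing (A : List Int) : ∃ j : Int, 1 ≤ j ∧ j ≤ (A.length : Int) + 1 ∧ j ∉ A := by
  by_contra h
  push Not at h
  have hsub : Finset.Icc (1 : Int) ((A.length : Int) + 1) ⊆ A.toFinset := by
    intro j hj
    rw [Finset.mem_Icc] at hj
    exact List.mem_toFinset.mpr (h j hj.1 hj.2)
  have hcard := Finset.card_le_card hsub
  rw [Int.card_Icc] at hcard
  have hle := List.toFinset_card_le A
  omega

-- the least missing positive exists and is at most N+1
lemma pv_least_missing (A : List Int) : ∃ m : Int, 1 ≤ m ∧ m ≤ (A.length : Int) + 1 ∧ m ∉ A ∧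
    ∀ k, 1 ≤ k → k < m → k ∈ A := by
  obtain ⟨j, hj1, hj2, hj3⟩ := pv_exists_missing A
  obtain ⟨m, ⟨⟨hm1, hmA⟩, hleast⟩⟩ := Int.exists_least_of_bdd (P := fun z => 1 ≤ z ∧ z ∉ A)
    ⟨1, fun z hz => hz.1⟩ ⟨j, hj1, hj3⟩
  refine ⟨m, hm1, le_trans (hleast j ⟨hj1, hj3⟩) hj2, hmA, ?_⟩
  intro k hk1 hk2
  by_contra hk
  exact absurd (hleast k ⟨hk1, hk⟩) (by omega)

-- membership of v ∈ [1,N] survives step 1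
lemma pv_mem_map_pvG (A : List Int) (v : Int) (h1 : 1 ≤ v) (h2 : v ≤ (A.length : Int)) :
    v ∈ A.map (pvG (A.length : Int)) ↔ v ∈ A := by
  constructor
  · intro h
    obtain ⟨u, hu, hgu⟩ := List.mem_map.mp h
    by_cases hc : u ≤ 0 ∨ u > (A.length : Int)
    · exfalso
      rw [pvG, if_pos hc] at hgu
      omega
    · rw [pvG, if_neg hc] at hgu
      rwa [← hgu]
  · intro h
    exact List.mem_map.mpr ⟨v, h, by rw [pvG, if_neg (by omega)]⟩

lemma pv_alt_eq (A : List Int) (m : Int) (hm1 : 1 ≤ m) (hm2 : m ≤ (A.length : Int) + 1)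
    (hmem : m ∉ A) (hlt : ∀ k, 1 ≤ k → k < m → k ∈ A) : solution_alt A = m := by
  show solutionAltLoop (PySem.Set.ofList A) (A.length + 1) 1 = m
  refine pv_altLoop_ret _ m (A.length + 1) 1 hm1 ?_ ?_ (by push_cast; omega)
  · intro hmem'
    exact hmem ((PySem.Set.mem_ofList A m).mp hmem')
  · intro k hk1 hk2
    exact (PySem.Set.mem_ofList A k).mpr (hlt k hk1 hk2)

-- step 3 on an array whose cell j is positive iff j+1 is missing from A
lemma pv_step3_run (A D : List Int) (m : Int)
    (hcell : ∀ j : Nat, j < A.length → (D.getD j 0 > 0 ↔ ((j:Int)+1) ∉ A))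
    (hm1 : 1 ≤ m) (hm2 : m ≤ (A.length : Int) + 1) (hmem : m ∉ A)
    (hlt : ∀ k, 1 ≤ k → k < m → k ∈ A) :
    solutionStep3 D (A.length : Int) (PySem.List.pyRange 0 (A.length : Int) 1) = m := by
  by_cases hcase : m ≤ (A.length : Int)
  · have hsplit : PySem.List.pyRange 0 (A.length : Int) 1
        = PySem.List.pyRange 0 (m-1) 1 ++ ((m-1) :: PySem.List.pyRange m (A.length : Int) 1) := by
      rw [PySem.List.pyRange_one_append 0 (m-1) (A.length : Int) (by omega) (by omega)]
      congr 1
      rw [PySem.List.pyRange_one_cons (by omega)]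
      norm_num
    rw [hsplit, pv_step3_first]
    · omega
    · intro i hi
      rw [PySem.List.mem_pyRange_one] at hi
      have hnn : (0:Int) ≤ i := hi.1
      have hjlt : i.toNat < A.length := by omega
      rw [PySem.List.pyGetD_of_nonneg _ _ hnn]
      intro hgt
      exact (hcell i.toNat hjlt).mp hgt (hlt ((i.toNat : Int)+1) (by omega) (by omega))
    · have hnn : (0:Int) ≤ m - 1 := by omega
      have hjlt : (m-1).toNat < A.length := by omega
      rw [PySem.List.pyGetD_of_nonneg _ _ hnn]
      have hx := hcell (m-1).toNat hjlt
      rw [show ((m-1).toNat : Int) + 1 = m from by omega] at hx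
      exact hx.mpr hmem
  · rw [pv_step3_none]
    · omega
    · intro i hi
      rw [PySem.List.mem_pyRange_one] at hi
      have hnn : (0:Int) ≤ i := hi.1
      have hjlt : i.toNat < A.length := by omega
      rw [PySem.List.pyGetD_of_nonneg _ _ hnn]
      intro hgt
      exact (hcell i.toNat hjlt).mp hgt (hlt ((i.toNat : Int)+1) (by omega) (by omega))

lemma pv_solution_eq (A : List Int) (m : Int) (hm1 : 1 ≤ m) (hm2 : m ≤ (A.length : Int) + 1)
    (hmem : m ∉ A) (hlt : ∀ k, 1 ≤ k → k < m → k ∈ A) : solution A = m := by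
  simp only [solution]
  have h1 := pv_step1_go (A.length : Int) A.length 0 A (by omega)
  simp only [Nat.cast_zero, List.take_zero, List.drop_zero, List.nil_append] at h1
  rw [h1]
  have hpos : ∀ j < (A.map (pvG (A.length : Int))).length,
      1 ≤ (A.map (pvG (A.length : Int))).getD j 0 ∧
      (A.map (pvG (A.length : Int))).getD j 0 ≤ ((A.map (pvG (A.length : Int))).length : Int) + 1 := by
    intro j hj
    have hj' : j < A.length := by simpa using hj
    rw [List.getD_eq_getElem _ 0 hj, List.getElem_map]
    simp only [List.length_map]
    unfold pvG
    split_ifs with h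
    · omega
    · push Not at h
      omega
  have hneg0 : ∀ j < (A.map (pvG (A.length : Int))).length,
      (A.map (pvG (A.length : Int))).getD j 0 < 0 ↔
        ∃ i < (0:Nat), (A.map (pvG (A.length : Int))).getD i 0 = (j:Int)+1 := by
    intro j hj
    constructor
    · intro h0
      exact absurd h0 (by have := (hpos j hj).1; omega)
    · rintro ⟨i, hi, _⟩
      exact absurd hi (by omega)
  have h2 := pv_step2_go (A.map (pvG (A.length : Int))) hpos A.length 0
    (by simp) (A.map (pvG (A.length : Int))) rfl (fun j hj => Or.inl rfl) hneg0
  simp only [List.length_map, Nat.cast_zero] at h2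
  obtain ⟨hlen2, habs2, hneg2⟩ := h2
  refine pv_step3_run A _ m ?_ hm1 hm2 hmem hlt
  intro j hj
  have hp : 1 ≤ (A.map (pvG (A.length : Int))).getD j 0 := (hpos j (by simpa using hj)).1
  have hmemiff : (∃ i < A.length, (A.map (pvG (A.length : Int))).getD i 0 = (j:Int)+1)
      ↔ ((j:Int)+1) ∈ A.map (pvG (A.length : Int)) := by
    constructor
    · rintro ⟨i, hi, he⟩
      rw [List.getD_eq_getElem _ 0 (by simpa using hi)] at he
      exact he ▸ List.getElem_mem _
    · intro hm
      obtain ⟨i, hi, he⟩ := List.mem_iff_getElem.mp hm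
      simp only [List.length_map] at hi
      exact ⟨i, hi, by rw [List.getD_eq_getElem _ 0 (by simpa using hi)]; exact he⟩
  have hA : (∃ i < A.length, (A.map (pvG (A.length : Int))).getD i 0 = (j:Int)+1) ↔ ((j:Int)+1) ∈ A := by
    rw [hmemiff]
    exact pv_mem_map_pvG A ((j:Int)+1) (by omega) (by omega)
  constructor
  · intro hgt hmm
    have hc := (hneg2 j hj).mpr (hA.mpr hmm)
    omega
  · intro hmm
    have hnc : ¬ _ := fun hc => hmm (hA.mp ((hneg2 j hj).mp hc))
    rcases habs2 j hj with he | he <;> omega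

-- ===== VERDICT (by name: the statement is the Claim_ definition above) =====
theorem solution_spec : Claim_equal_solution := by
  intro A _
  obtain ⟨m, hm1, hm2, hmem, hlt⟩ := pv_least_missing A
  show solution A = solution_alt A
  rw [pv_solution_eq A m hm1 hm2 hmem hlt, pv_alt_eq A m hm1 hm2 hmem hlt]
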